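-- pv_equiv track=rewrite | github.com/matheuscosta71/Interfatecs-2025 | A.py | mudar_decimal
-- ===== SOURCE A (Python) =====
-- def base20(simbolo):
--     if simbolo == '*':
--         return 0
--     return simbolo.count('.') * 1 + simbolo.count('-') * 5
--
-- def mudar_decimal(linhas):
--     resultados = []
--     for linha in linhas:
--         if linha.strip() == '*':
--             resultados.append(0)
--             break
--         simbolos = linha.strip().split()
--         simbolos.reverse()
--         total = 0
--         for i, simbolo in enumerate(simbolos):
--             total += base20(simbolo) * (20 ** i)
--         resultados.append(total)
--     return resultados
-- ===== SOURCE B (Python) =====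
-- def digito(simbolo):
--     if simbolo == '*':
--         return 0
--     return simbolo.count('.') + 5 * simbolo.count('-')
--
--
-- def valor(simbolos):
--     total = 0
--     for s in simbolos:
--         total = total * 20 + digito(s)
--     return total
--
--
-- def mudar_decimal(linhas):
--     paradas = [linha.strip() == '*' for linha in linhas]
--     n = paradas.index(True) + 1 if True in paradas else len(linhas)
--     return [0 if parada else valor(linha.strip().split())
--             for parada, linha in zip(paradas, linhas[:n])]
-- ===== Notes on version B (the rewrite author's own statement) =====
-- stated objective: simpler
-- what changed: A's single loop with break-on-'*' and a reversed power-sum per line is replaced by staged passes: compute the stop flags, cut the list at the first stop line via index, then map a forward Horner evaluation (total*20 + digit) over the prefix.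
import Mathlib
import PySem

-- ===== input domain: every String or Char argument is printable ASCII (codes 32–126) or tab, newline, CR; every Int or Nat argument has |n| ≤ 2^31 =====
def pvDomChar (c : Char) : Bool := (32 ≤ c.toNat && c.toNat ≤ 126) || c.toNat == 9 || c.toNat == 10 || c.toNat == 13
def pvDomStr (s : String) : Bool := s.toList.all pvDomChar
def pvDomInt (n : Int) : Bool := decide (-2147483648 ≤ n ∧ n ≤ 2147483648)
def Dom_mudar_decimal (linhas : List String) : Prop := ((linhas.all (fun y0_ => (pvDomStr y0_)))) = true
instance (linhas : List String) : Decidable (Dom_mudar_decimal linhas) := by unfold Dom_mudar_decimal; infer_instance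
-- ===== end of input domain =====

-- B replaces A's break-carrying loop with staged passes (flag the stop lines, cut the
-- list at the first stop with index, map a forward Horner evaluation over the prefix);
-- objective: simpler.

-- ===== PORT A =====
-- A's helper base20
def base20 (simbolo : String) : Int :=
  if simbolo = "*" then 0
  else (PySem.Str.count simbolo "." : Int) * 1 + (PySem.Str.count simbolo "-" : Int) * 5

-- the outer for-loop with `break` becomes structural recursion; the inner
-- enumerate-loop over the reversed symbols is a foldl over PySem.List.enumerate
def mudar_decimal (linhas : List String) : List Int :=
  match linhas with
  | [] => []
  | linha :: rest =>
    if PySem.Str.strip linha = "*" then [0]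
    else
      let simbolos := (PySem.Str.split₀ (PySem.Str.strip linha)).reverse
      let total := (PySem.List.enumerate simbolos 0).foldl
        (fun t p => t + base20 p.2 * (20 : Int) ^ p.1.toNat) 0
      total :: mudar_decimal rest

-- ===== PORT B =====
-- B's helper digito
def digito (simbolo : String) : Int :=
  if simbolo = "*" then 0
  else (PySem.Str.count simbolo "." : Int) + 5 * (PySem.Str.count simbolo "-" : Int)

-- B's helper valor: forward Horner pass over the symbols of one line
def valor (simbolos : List String) : Int :=
  simbolos.foldl (fun total s => total * 20 + digito s) 0

def mudar_decimal_alt (linhas : List String) : List Int :=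
  let paradas := linhas.map (fun linha => PySem.Str.strip linha == "*")
  let n : Nat := match PySem.List.index? paradas true with
    | some i => i + 1
    | none => linhas.length
  (paradas.zip (linhas.take n)).map
    (fun p => if p.1 then 0 else valor (PySem.Str.split₀ (PySem.Str.strip p.2)))

-- ===== PRECONDITION & SPEC =====
def Spec_mudar_decimal (linhas : List String) (out : List Int) : Prop := out = mudar_decimal_alt linhas
instance (linhas : List String) (out : List Int) : Decidable (Spec_mudar_decimal linhas out) := by unfold Spec_mudar_decimal; infer_instance

-- ===== CLAIM (what is proved, stated in full; the proofs are below) =====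
def Claim_equal_mudar_decimal : Prop := ∀ (linhas : List String), Dom_mudar_decimal linhas → Spec_mudar_decimal linhas (mudar_decimal linhas)

-- ===== LEMMAS AND PROOFS =====

-- the base-20 value of a symbol list, most-significant symbol first
def pvPoly : List String → Int
  | [] => 0
  | s :: rest => pvPoly rest + digito s * (20 : Int) ^ rest.length

theorem pvBase20_eq_digito (s : String) : base20 s = digito s := by
  unfold base20 digito; split_ifs <;> ring

theorem pvHorner (l : List String) (a : Int) :
    l.foldl (fun t s => t * 20 + digito s) a = a * (20 : Int) ^ l.length + pvPoly l := by
  induction l generalizing a with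
  | nil => simp [pvPoly]
  | cons s rest ih =>
    simp only [List.foldl_cons, ih, pvPoly, List.length_cons]
    ring

theorem pvEnumSum (l : List String) :
    (PySem.List.enumerate l.reverse 0).foldl
      (fun t p => t + base20 p.2 * (20 : Int) ^ p.1.toNat) 0 = pvPoly l := by
  induction l with
  | nil => simp [PySem.List.enumerate_nil, pvPoly]
  | cons s rest ih =>
    have hrev : (s :: rest).reverse = rest.reverse ++ [s] := by simp
    rw [hrev, PySem.List.enumerate_append, List.foldl_append]
    simp only [ih, PySem.List.enumerate_cons, PySem.List.enumerate_nil,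
      List.foldl_cons, List.foldl_nil, List.length_reverse, pvPoly]
    rw [pvBase20_eq_digito]
    norm_num

-- B's staged pipeline satisfies the same cons-recurrence as A's loop
theorem pvAlt_cons (linha : String) (rest : List String) :
    mudar_decimal_alt (linha :: rest) =
      if PySem.Str.strip linha = "*" then [0]
      else valor (PySem.Str.split₀ (PySem.Str.strip linha)) :: mudar_decimal_alt rest := by
  by_cases h : PySem.Str.strip linha = "*"
  · have ht : (PySem.Str.strip linha == "*") = true := by simp [h]
    unfold mudar_decimal_alt
    simp only [List.map_cons, ht]
    rw [PySem.List.index?_cons_self]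
    simp [h]
  · have hne : (PySem.Str.strip linha == "*") = false := by simp [h]
    unfold mudar_decimal_alt
    simp only [List.map_cons, hne]
    rw [PySem.List.index?_cons_of_ne _ (by decide : (false : Bool) ≠ true)]
    cases PySem.List.index? (rest.map (fun l => PySem.Str.strip l == "*")) true with
    | none => simp only [Option.map_none, List.length_cons, List.take_succ_cons,
        List.zip_cons_cons, List.map_cons, h, if_false, Bool.false_eq_true]
    | some i => simp only [Option.map_some, List.take_succ_cons,
        List.zip_cons_cons, List.map_cons, Bool.false_eq_true, if_false, h]

-- ===== VERDICT (by name: the statement is the Claim_ definition above) =====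
theorem pvMain (linhas : List String) : mudar_decimal linhas = mudar_decimal_alt linhas := by
  induction linhas with
  | nil => rfl
  | cons linha rest ih =>
    rw [pvAlt_cons]
    unfold mudar_decimal
    by_cases h : PySem.Str.strip linha = "*"
    · simp [h]
    · simp only [h, if_false]
      rw [pvEnumSum]
      unfold valor
      rw [pvHorner]
      simp [ih]

theorem mudar_decimal_spec : Claim_equal_mudar_decimal := fun linhas _ => pvMain linhas
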